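-- pv_equiv track=rewrite | github.com/Bullish-Intelligence/remora | .context/fsdantic/src/fsdantic/_internal/paths.py | normalize_glob_pattern
-- ===== SOURCE A (Python) =====
-- def normalize_separators(path: str) -> str:
--     """Normalize all path separators to POSIX style."""
--     return path.replace("\\", "/")
--
-- def collapse_duplicate_slashes(path: str) -> str:
--     """Collapse repeated path separators into single slashes."""
--     if not path:
--         return path
--
--     collapsed: list[str] = []
--     previous_was_slash = False
--     for char in path:
--         if char == "/":
--             if previous_was_slash:
--                 continue
--             previous_was_slash = True
--         else:
--             previous_was_slash = False
--         collapsed.append(char)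
--     return "".join(collapsed)
--
-- def normalize_glob_pattern(pattern: str) -> str:
--     """Normalize path-like parts of a glob pattern.
--
--     Keeps wildcard tokens intact while applying separator normalization,
--     duplicate slash collapse, and '.'/'..' cleanup.
--     """
--     normalized = collapse_duplicate_slashes(normalize_separators(pattern.strip()))
--     if not normalized:
--         return "*"
--
--     absolute = normalized.startswith("/")
--     segments = normalized.split("/")
--     cleaned: list[str] = []
--
--     for segment in segments:
--         if segment in ("", "."):
--             continue
--         if segment == "..":
--             if cleaned and cleaned[-1] != "..":
--                 cleaned.pop()
--                 continue
--             if not absolute: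
--                 cleaned.append(segment)
--             continue
--         cleaned.append(segment)
--
--     if absolute:
--         result = "/" + "/".join(cleaned)
--     else:
--         result = "/".join(cleaned)
--
--     if not result:
--         return "/" if absolute else "*"
--
--     if result != "/":
--         result = result.rstrip("/")
--
--     return result
-- ===== SOURCE B (Python) =====
-- def normalize_glob_pattern(pattern: str) -> str:
--     """Normalize path-like parts of a glob pattern.
--
--     Instead of a left-to-right stack with pops, walk the segments in
--     REVERSE carrying a skip counter: each '..' cancels the nearest
--     normal segment to its left; leftover '..'s survive only in
--     relative patterns.
--     """
--     s = pattern.strip().replace("\\", "/")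
--     if not s:
--         return "*"
--     absolute = s.startswith("/")
--     segs = [seg for seg in s.split("/") if seg not in ("", ".")]
--     skip = 0
--     kept = []
--     for seg in reversed(segs):
--         if seg == "..":
--             skip += 1
--         elif skip:
--             skip -= 1
--         else:
--             kept.append(seg)
--     kept.reverse()
--     if absolute:
--         return "/" + "/".join(kept)
--     kept = [".."] * skip + kept
--     return "/".join(kept) if kept else "*"
-- ===== Notes on version B (the rewrite author's own statement) =====
-- stated objective: faster
-- what changed: B replaces A's left-to-right stack (getLast checks and pops for '..') by a reversed traversal with a skip counter, filters ''/'.' segments up front with a comprehension, and drops A's per-character duplicate-slash collapse pass and the final rstrip('/') entirely.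
import Mathlib
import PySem

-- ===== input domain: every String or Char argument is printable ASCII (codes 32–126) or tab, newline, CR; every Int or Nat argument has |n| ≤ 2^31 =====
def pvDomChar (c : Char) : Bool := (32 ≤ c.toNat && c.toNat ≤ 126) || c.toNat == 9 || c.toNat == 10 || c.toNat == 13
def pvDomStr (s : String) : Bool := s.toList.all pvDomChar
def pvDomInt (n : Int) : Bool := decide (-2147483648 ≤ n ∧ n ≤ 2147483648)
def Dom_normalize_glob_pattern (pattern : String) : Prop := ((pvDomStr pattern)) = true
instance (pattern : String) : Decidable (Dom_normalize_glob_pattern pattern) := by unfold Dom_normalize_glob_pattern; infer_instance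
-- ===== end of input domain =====

-- B replaces A's left-to-right stack (pops/getLast for '..') by a reversed traversal with a
-- skip counter, an up-front comprehension filter, and no separate slash-collapse or rstrip pass
-- (objective: alternative).

-- ===== PORT A =====
def normalize_separators (path : String) : String := PySem.Str.replace path "\\" "/"

-- one step of collapse_duplicate_slashes' for-loop: state = (collapsed, previous_was_slash)
def collapseStep (st : List Char × Bool) (c : Char) : List Char × Bool :=
  if c = '/' then (if st.2 then st else (st.1 ++ [c], true)) else (st.1 ++ [c], false)

def collapse_duplicate_slashes (path : String) : String :=
  if path = "" then path
  else String.ofList (path.toList.foldl collapseStep ([], false)).1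

-- the non-skipped part of A's segment loop body; cleaned[-1]/pop() are exact here
-- because they are guarded by 'cleaned ≠ []'
def segPush (absolute : Bool) (cleaned : List (List Char)) (seg : List Char) : List (List Char) :=
  if seg = ['.', '.'] then
    (if cleaned ≠ [] ∧ cleaned.getLast? ≠ some ['.', '.'] then cleaned.dropLast
     else if absolute = false then cleaned ++ [seg] else cleaned)
  else cleaned ++ [seg]

def segStep (absolute : Bool) (cleaned : List (List Char)) (seg : List Char) : List (List Char) :=
  if seg = [] ∨ seg = ['.'] then cleaned else segPush absolute cleaned seg

-- exact hand port of str.rstrip("/"): drop trailing '/' characters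
def rstripSlash (cs : List Char) : List Char := (cs.reverse.dropWhile (· == '/')).reverse

def normalize_glob_pattern (pattern : String) : String :=
  let normalized := collapse_duplicate_slashes (normalize_separators (PySem.Str.strip pattern))
  if normalized = "" then "*"
  else
    let absolute := PySem.Chars.startswith normalized.toList ['/']
    let segments := PySem.Chars.splitOn normalized.toList ['/']
    let cleaned := segments.foldl (segStep absolute) []
    let result := if absolute then '/' :: PySem.Chars.join ['/'] cleaned
                  else PySem.Chars.join ['/'] cleaned
    if result = [] then (if absolute then "/" else "*")
    else if result ≠ ['/'] then String.ofList (rstripSlash result)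
    else String.ofList result

-- ===== PORT B =====
-- one step of B's reversed loop: state = (skip, kept-appended-in-reverse)
def revStep (st : Nat × List (List Char)) (seg : List Char) : Nat × List (List Char) :=
  if seg = ['.', '.'] then (st.1 + 1, st.2)
  else if st.1 ≠ 0 then (st.1 - 1, st.2)
  else (st.1, st.2 ++ [seg])

def normalize_glob_pattern_alt (pattern : String) : String :=
  let s := PySem.Str.replace (PySem.Str.strip pattern) "\\" "/"
  if s = "" then "*"
  else
    let absolute := PySem.Chars.startswith s.toList ['/']
    let segs := (PySem.Chars.splitOn s.toList ['/']).filter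
      (fun seg => decide (¬ (seg = [] ∨ seg = ['.'])))
    let st := segs.reverse.foldl revStep (0, [])
    let kept := st.2.reverse
    if absolute then String.ofList ('/' :: PySem.Chars.join ['/'] kept)
    else
      let kept' := List.replicate st.1 ['.', '.'] ++ kept
      if kept' ≠ [] then String.ofList (PySem.Chars.join ['/'] kept') else "*"

-- ===== PRECONDITION & SPEC =====
def Spec_normalize_glob_pattern (pattern : String) (out : String) : Prop := out = normalize_glob_pattern_alt pattern
instance (pattern : String) (out : String) : Decidable (Spec_normalize_glob_pattern pattern out) := by unfold Spec_normalize_glob_pattern; infer_instance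

-- ===== CLAIM (what is proved, stated in full; the proofs are below) =====
def Claim_equal_normalize_glob_pattern : Prop := ∀ (pattern : String), Dom_normalize_glob_pattern pattern → Spec_normalize_glob_pattern pattern (normalize_glob_pattern pattern)

-- ===== LEMMAS AND PROOFS =====

-- clean recursive form of collapse_duplicate_slashes' fold
def crec : Bool → List Char → List Char
  | _, [] => []
  | prev, c :: t => if c = '/' then (if prev then crec true t else '/' :: crec true t) else c :: crec false t

-- clean recursive form of split on a single character
def splitc (c : Char) : List Char → List (List Char)
  | [] => [[]]
  | a :: t => if a = c then [] :: splitc c t else (splitc c t).modifyHead (a :: ·)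

theorem foldl_collapseStep (cs : List Char) : ∀ (acc : List Char) (prev : Bool),
    (cs.foldl collapseStep (acc, prev)).1 = acc ++ crec prev cs := by
  induction cs with
  | nil => intro acc prev; simp [crec]
  | cons c t ih =>
    intro acc prev
    by_cases hc : c = '/'
    · cases prev <;> simp [collapseStep, hc, crec, ih]
    · simp [collapseStep, hc, crec, ih]

theorem splitc_ne_nil (c : Char) (cs : List Char) : splitc c cs ≠ [] := by
  induction cs with
  | nil => simp [splitc]
  | cons a t ih =>
    by_cases h : a = c
    · simp [splitc, h]
    · simp only [splitc, if_neg h]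
      intro hcontra
      exact ih (by simpa using congrArg List.length hcontra)

theorem splitOn_go_singleton (c : Char) (l : List Char) : ∀ (fuel : Nat) (cur : List Char) (acc : List (List Char)),
    l.length ≤ fuel →
    PySem.Chars.splitOn.go [c] fuel l cur acc = acc.reverse ++ (splitc c l).modifyHead (cur.reverse ++ ·) := by
  induction l with
  | nil =>
    intro fuel cur acc _
    cases fuel <;> simp [PySem.Chars.splitOn.go, splitc]
  | cons a t ih =>
    intro fuel cur acc hfuel
    cases fuel with
    | zero => simp at hfuel
    | succ fuel =>
      by_cases h : a = c
      · have hpre : [c].isPrefixOf (a :: t) = true := by simp [List.isPrefixOf, h]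
        simp only [PySem.Chars.splitOn.go, hpre, if_true]
        have hdrop : List.drop [c].length (a :: t) = t := by simp
        rw [hdrop, ih fuel [] (cur.reverse :: acc) (by simpa using Nat.le_of_succ_le_succ hfuel)]
        obtain ⟨hd, tl, he⟩ := List.exists_cons_of_ne_nil (splitc_ne_nil c t)
        simp [splitc, h, he]
      · have hpre : [c].isPrefixOf (a :: t) = false := by
          simp [List.isPrefixOf]; exact fun hca => absurd hca.symm h
        simp only [PySem.Chars.splitOn.go, hpre, Bool.false_eq_true, if_false]
        rw [ih fuel (a :: cur) acc (by simpa using Nat.le_of_succ_le_succ hfuel)]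
        obtain ⟨hd, tl, he⟩ := List.exists_cons_of_ne_nil (splitc_ne_nil c t)
        simp [splitc, h, he]

theorem splitOn_singleton (c : Char) (l : List Char) :
    PySem.Chars.splitOn l [c] = splitc c l := by
  unfold PySem.Chars.splitOn
  rw [splitOn_go_singleton c l (l.length + 1) [] [] (by omega)]
  obtain ⟨hd, tl, he⟩ := List.exists_cons_of_ne_nil (splitc_ne_nil c l)
  simp [he]

theorem splitc_head (c : Char) (cs : List Char) :
    (splitc c cs).head? = some (cs.takeWhile (fun a => a != c)) := by
  induction cs with
  | nil => simp [splitc]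
  | cons a t ih =>
    by_cases h : a = c
    · simp [splitc, h, List.takeWhile]
    · obtain ⟨hd, tl, he⟩ := List.exists_cons_of_ne_nil (splitc_ne_nil c t)
      rw [he] at ih
      simp only [List.head?] at ih
      have hb : (a != c) = true := by simp [h]
      simp [splitc, h, he, List.takeWhile, hb, ← Option.some_inj.mp ih]

theorem splitc_no_sep (c : Char) (cs : List Char) : ∀ s ∈ splitc c cs, c ∉ s := by
  induction cs with
  | nil => simp [splitc]
  | cons a t ih =>
    intro s hs
    by_cases h : a = c
    · rw [splitc, if_pos h] at hs
      rcases List.mem_cons.mp hs with hs | hs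
      · simp [hs]
      · exact ih s hs
    · obtain ⟨hd, tl, he⟩ := List.exists_cons_of_ne_nil (splitc_ne_nil c t)
      rw [splitc, if_neg h, he, List.modifyHead] at hs
      rcases List.mem_cons.mp hs with hs | hs
      · subst hs
        have hhd := ih hd (by simp [he])
        simp only [List.mem_cons]
        rintro (rfl | hmem)
        · exact h rfl
        · exact hhd hmem
      · exact ih s (by simp [he, hs])

def words (cs : List Char) : List (List Char) :=
  (splitc '/' cs).filter (fun s => decide (s ≠ []))

def tailwords (cs : List Char) : List (List Char) :=
  ((splitc '/' cs).tail).filter (fun s => decide (s ≠ []))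

theorem words_cons_slash (cs : List Char) : words ('/' :: cs) = words cs := by
  simp [words, splitc]

theorem words_cons_of_ne (a : Char) (cs : List Char) (h : a ≠ '/') :
    words (a :: cs) = (a :: cs.takeWhile (fun x => x != '/')) :: tailwords cs := by
  obtain ⟨hd, tl, he⟩ := List.exists_cons_of_ne_nil (splitc_ne_nil '/' cs)
  have hhd : hd = cs.takeWhile (fun x => x != '/') := by
    have := splitc_head '/' cs
    rw [he] at this; simpa using this
  simp [words, tailwords, splitc, h, he, hhd]

theorem words_eq (cs : List Char) :
    words cs = (if cs.takeWhile (fun x => x != '/') = [] then ([] : List (List Char))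
      else [cs.takeWhile (fun x => x != '/')]) ++ tailwords cs := by
  obtain ⟨hd, tl, he⟩ := List.exists_cons_of_ne_nil (splitc_ne_nil '/' cs)
  have hhd : hd = cs.takeWhile (fun x => x != '/') := by
    have := splitc_head '/' cs
    rw [he] at this; simpa using this
  by_cases hnil : cs.takeWhile (fun x => x != '/') = []
  · simp [words, tailwords, he, hhd, hnil]
  · simp [words, tailwords, he, hhd, hnil]

theorem takeWhile_crec_false (cs : List Char) :
    (crec false cs).takeWhile (fun x => x != '/') = cs.takeWhile (fun x => x != '/') := by
  induction cs with
  | nil => simp [crec]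
  | cons a t ih =>
    by_cases h : a = '/'
    · simp [crec, h, List.takeWhile]
    · have hb : (a != '/') = true := by simp [h]
      simp [crec, h, List.takeWhile, hb, ih]

theorem crec_false_slash (t : List Char) : crec false ('/' :: t) = '/' :: crec true t := by
  simp [crec]

theorem crec_true_slash (t : List Char) : crec true ('/' :: t) = crec true t := by
  simp [crec]

theorem words_crec (cs : List Char) : ∀ prev, words (crec prev cs) = words cs := by
  induction cs with
  | nil => intro prev; simp [crec]
  | cons a t ih =>
    intro prev
    by_cases h : a = '/'
    · subst h
      cases prev
      · rw [crec_false_slash, words_cons_slash, words_cons_slash, ih true]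
      · rw [crec_true_slash, words_cons_slash, ih true]
    · have hc : crec prev (a :: t) = a :: crec false t := by
        cases prev <;> simp [crec, h]
      rw [hc, words_cons_of_ne a _ h, words_cons_of_ne a _ h, takeWhile_crec_false]
      have htail : tailwords (crec false t) = tailwords t := by
        have hw := ih false
        rw [words_eq (crec false t), words_eq t, takeWhile_crec_false] at hw
        by_cases hnil : t.takeWhile (fun x => x != '/') = []
        · simpa [hnil] using hw
        · simpa [hnil] using hw
      rw [htail]

theorem crec_false_eq_nil_iff (cs : List Char) : crec false cs = [] ↔ cs = [] := by
  cases cs with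
  | nil => simp [crec]
  | cons a t =>
    by_cases h : a = '/' <;> simp [crec, h]

theorem startswith_crec_false (cs : List Char) :
    PySem.Chars.startswith (crec false cs) ['/'] = PySem.Chars.startswith cs ['/'] := by
  cases cs with
  | nil => simp [crec]
  | cons a t =>
    by_cases h : a = '/' <;> simp [crec, h, PySem.Chars.startswith, List.isPrefixOf]

-- the segment loop skips '' and '.', so it is a fold over the filtered segments
theorem foldl_skip {α β : Type} (p : β → Prop) [DecidablePred p] (f : α → β → α)
    (l : List β) (init : α) :
    l.foldl (fun acc x => if p x then acc else f acc x) init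
      = (l.filter (fun x => decide (¬ p x))).foldl f init := by
  induction l generalizing init with
  | nil => rfl
  | cons x t ih =>
    by_cases h : p x <;> simp [h, ih]

theorem filter_good_eq (X : List (List Char)) :
    X.filter (fun s => decide (¬ (s = [] ∨ s = ['.'])))
      = (X.filter (fun s => decide (s ≠ []))).filter (fun s => decide (s ≠ ['.'])) := by
  rw [List.filter_filter]
  apply List.filter_congr
  intro x _
  by_cases h1 : x = ([] : List Char) <;> by_cases h2 : x = ['.'] <;> simp [h1, h2]

-- A's and B's filtered segment lists coincide: collapsing duplicate slashes only
-- removes empty segments, which the filter drops anyway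
theorem filtered_crec (cs : List Char) :
    (splitc '/' (crec false cs)).filter (fun s => decide (¬ (s = [] ∨ s = ['.'])))
      = (splitc '/' cs).filter (fun s => decide (¬ (s = [] ∨ s = ['.']))) := by
  rw [filter_good_eq, filter_good_eq]
  have hw : words (crec false cs) = words cs := words_crec cs false
  unfold words at hw
  rw [hw]

-- B's reversed loop in clean right-recursive form: (pending '..' skips, kept segments)
def brec : List (List Char) → Nat × List (List Char)
  | [] => (0, [])
  | x :: L =>
    let p := brec L
    if x = ['.', '.'] then (p.1 + 1, p.2)
    else if p.1 ≠ 0 then (p.1 - 1, p.2)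
    else (p.1, x :: p.2)

theorem rev_foldl_eq_brec (L : List (List Char)) :
    L.reverse.foldl revStep (0, ([] : List (List Char))) = ((brec L).1, (brec L).2.reverse) := by
  induction L with
  | nil => rfl
  | cons x L ih =>
    rw [List.reverse_cons, List.foldl_append, ih]
    simp only [List.foldl_cons, List.foldl_nil, brec, revStep]
    by_cases hx : x = ['.', '.']
    · simp [hx]
    · by_cases hk : (brec L).1 ≠ 0 <;> simp [hx, hk]

theorem brec_mem (L : List (List Char)) : ∀ x ∈ (brec L).2, x ∈ L := by
  induction L with
  | nil => simp [brec]
  | cons y L ih =>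
    intro x hx
    simp only [brec] at hx
    split_ifs at hx with h1 h2
    · exact List.mem_cons_of_mem y (ih x hx)
    · exact List.mem_cons_of_mem y (ih x hx)
    · rcases List.mem_cons.mp hx with rfl | hx
      · exact List.mem_cons_self
      · exact List.mem_cons_of_mem y (ih x hx)

-- A's absolute-mode stack fold equals B's counter recursion (generalized over the stack)
theorem foldl_segPush_true (L : List (List Char)) : ∀ (s : List (List Char)), ['.', '.'] ∉ s →
    L.foldl (segPush true) s = s.take (s.length - (brec L).1) ++ (brec L).2 := by
  induction L with
  | nil => intro s _; simp [brec]
  | cons x L ih =>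
    intro s hs
    by_cases hx : x = ['.', '.']
    · have hpush : segPush true s x = s.dropLast := by
        unfold segPush
        rw [if_pos hx]
        by_cases hne : s = []
        · simp [hne]
        · have hlast : s.getLast? ≠ some ['.', '.'] := by
            intro hc
            exact hs (List.mem_of_getLast? hc)
          simp [hne, hlast]
      have hs' : ['.', '.'] ∉ s.dropLast := fun hc => hs (List.mem_of_mem_dropLast hc)
      have hbx : brec (x :: L) = ((brec L).1 + 1, (brec L).2) := by simp [brec, hx]
      rw [List.foldl_cons, hpush, ih s.dropLast hs', hbx]
      have h1 : s.dropLast.take (s.dropLast.length - (brec L).1)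
          = s.take (s.length - ((brec L).1 + 1)) := by
        rw [List.dropLast_eq_take, List.length_take, List.take_take]
        congr 1
        omega
      rw [h1]
    · have hpush : segPush true s x = s ++ [x] := by
        unfold segPush; rw [if_neg hx]
      have hs' : ['.', '.'] ∉ s ++ [x] := by
        simp only [List.mem_append, List.mem_singleton]
        rintro (hc | rfl)
        · exact hs hc
        · exact hx rfl
      rw [List.foldl_cons, hpush, ih _ hs']
      by_cases hk : (brec L).1 = 0
      · have hbx : brec (x :: L) = ((brec L).1, x :: (brec L).2) := by simp [brec, hx, hk]
        rw [hbx, hk]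
        have h1 : (s ++ [x]).take ((s ++ [x]).length - 0) = s ++ [x] :=
          List.take_of_length_le (by simp)
        have h2 : s.take (s.length - 0) = s := List.take_of_length_le (by simp)
        rw [h1, h2, List.append_assoc]
        rfl
      · have hbx : brec (x :: L) = ((brec L).1 - 1, (brec L).2) := by simp [brec, hx, hk]
        rw [hbx]
        have h1 : (s ++ [x]).take ((s ++ [x]).length - (brec L).1)
            = s.take (s.length - ((brec L).1 - 1)) := by
          rw [List.take_append, List.length_append]
          have hz : s.length + [x].length - (brec L).1 - s.length = 0 := by
            simp only [List.length_singleton]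
            omega
          rw [hz, List.take_zero, List.append_nil]
          congr 1
          simp only [List.length_singleton]
          omega
        rw [h1]

theorem foldl_segPush_false (L : List (List Char)) : ∀ (k : Nat) (s : List (List Char)), ['.', '.'] ∉ s →
    L.foldl (segPush false) (List.replicate k ['.', '.'] ++ s)
      = List.replicate (k + ((brec L).1 - s.length)) ['.', '.'] ++ s.take (s.length - (brec L).1) ++ (brec L).2 := by
  induction L with
  | nil => intro k s _; simp [brec]
  | cons x L ih =>
    intro k s hs
    by_cases hx : x = ['.', '.']
    · have hbx : brec (x :: L) = ((brec L).1 + 1, (brec L).2) := by simp [brec, hx]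
      by_cases hne : s = []
      · subst hne
        have hpush : segPush false (List.replicate k ['.', '.'] ++ []) x
            = List.replicate (k + 1) ['.', '.'] ++ [] := by
          unfold segPush
          rw [if_pos hx]
          by_cases hk0 : k = 0
          · subst hk0; simp [hx]
          · have hlast : (List.replicate k (['.', '.'] : List Char) ++ []).getLast? = some ['.', '.'] := by
              rw [List.append_nil]
              cases k with
              | zero => omega
              | succ n => simp [List.getLast?_replicate]
            simp only [hlast]
            simp [hx, List.replicate_succ']
        rw [List.foldl_cons, hpush, ih (k + 1) [] (by simp), hbx]
        simp only [List.length_nil, List.take_nil, Nat.sub_zero]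
        have hn : k + 1 + (brec L).1 = k + ((brec L).1 + 1) := by omega
        rw [hn]
      · have hlast : (List.replicate k (['.', '.'] : List Char) ++ s).getLast? ≠ some ['.', '.'] := by
          rw [List.getLast?_append_of_ne_nil _ hne]
          intro hc
          exact hs (List.mem_of_getLast? hc)
        have hnil : List.replicate k (['.', '.'] : List Char) ++ s ≠ [] := by
          simp [hne]
        have hpush : segPush false (List.replicate k ['.', '.'] ++ s) x
            = List.replicate k ['.', '.'] ++ s.dropLast := by
          unfold segPush
          rw [if_pos hx, if_pos ⟨hnil, hlast⟩, List.dropLast_append_of_ne_nil hne]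
        have hs' : ['.', '.'] ∉ s.dropLast := fun hc => hs (List.mem_of_mem_dropLast hc)
        rw [List.foldl_cons, hpush, ih k _ hs', hbx]
        have hlen : 1 ≤ s.length := by
          cases s with
          | nil => exact absurd rfl hne
          | cons a t => simp
        have h1 : s.dropLast.take (s.dropLast.length - (brec L).1)
            = s.take (s.length - ((brec L).1 + 1)) := by
          rw [List.dropLast_eq_take, List.length_take, List.take_take]
          congr 1
          omega
        rw [h1]
        congr 3
        rw [List.length_dropLast]
        omega
    · have hpush : segPush false (List.replicate k ['.', '.'] ++ s) x
          = List.replicate k ['.', '.'] ++ (s ++ [x]) := by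
        unfold segPush; rw [if_neg hx, List.append_assoc]
      have hs' : ['.', '.'] ∉ s ++ [x] := by
        simp only [List.mem_append, List.mem_singleton]
        rintro (hc | rfl)
        · exact hs hc
        · exact hx rfl
      rw [List.foldl_cons, hpush, ih k _ hs']
      by_cases hk : (brec L).1 = 0
      · have hbx : brec (x :: L) = ((brec L).1, x :: (brec L).2) := by simp [brec, hx, hk]
        rw [hbx, hk]
        have h1 : (s ++ [x]).take ((s ++ [x]).length - 0) = s ++ [x] :=
          List.take_of_length_le (by simp)
        have h2 : s.take (s.length - 0) = s := List.take_of_length_le (by simp)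
        rw [h1, h2]
        simp
      · have hbx : brec (x :: L) = ((brec L).1 - 1, (brec L).2) := by simp [brec, hx, hk]
        rw [hbx]
        have h1 : (s ++ [x]).take ((s ++ [x]).length - (brec L).1)
            = s.take (s.length - ((brec L).1 - 1)) := by
          rw [List.take_append, List.length_append]
          have hz : s.length + [x].length - (brec L).1 - s.length = 0 := by
            simp only [List.length_singleton]
            omega
          rw [hz, List.take_zero, List.append_nil]
          congr 1
          simp only [List.length_singleton]
          omega
        rw [h1]
        congr 3
        simp only [List.length_append, List.length_singleton]
        omega

theorem join_ne_nil (L : List (List Char)) (hne : L ≠ [])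
    (h : ∀ x ∈ L, x ≠ []) : PySem.Chars.join ['/'] L ≠ [] := by
  cases L with
  | nil => exact absurd rfl hne
  | cons a t =>
    cases t with
    | nil => simpa [PySem.Chars.join_singleton] using h a (by simp)
    | cons b u =>
      rw [PySem.Chars.join_cons_cons]
      have ha := h a (by simp)
      cases a with
      | nil => exact absurd rfl ha
      | cons c cs => simp

theorem getLast?_join (L : List (List Char)) (hne : L ≠ [])
    (h : ∀ x ∈ L, x ≠ [] ∧ '/' ∉ x) : (PySem.Chars.join ['/'] L).getLast? ≠ some '/' := by
  induction L with
  | nil => exact absurd rfl hne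
  | cons a t ih =>
    cases t with
    | nil =>
      rw [PySem.Chars.join_singleton]
      intro hcontra
      exact (h a (by simp)).2 (List.mem_of_getLast? hcontra)
    | cons b u =>
      rw [PySem.Chars.join_cons_cons]
      have hjoin_ne : PySem.Chars.join ['/'] (b :: u) ≠ [] :=
        join_ne_nil _ (by simp) (fun x hx => (h x (by simp [hx])).1)
      rw [List.append_assoc, List.getLast?_append_of_ne_nil _ (by simp)]
      rw [show ['/'] ++ PySem.Chars.join ['/'] (b :: u) = '/' :: PySem.Chars.join ['/'] (b :: u) from rfl]
      rw [show ('/' :: PySem.Chars.join ['/'] (b :: u)) = ['/'] ++ PySem.Chars.join ['/'] (b :: u) from rfl,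
        List.getLast?_append_of_ne_nil _ hjoin_ne]
      exact ih (by simp) (fun x hx => h x (by simp [hx]))

theorem rstripSlash_of_getLast? (cs : List Char) (h : cs.getLast? ≠ some '/') :
    rstripSlash cs = cs := by
  unfold rstripSlash
  cases hrev : cs.reverse with
  | nil => rw [List.reverse_eq_nil_iff.mp hrev]; rfl
  | cons a t =>
    have ha : a ≠ '/' := by
      intro hcontra
      apply h
      rw [← List.head?_reverse, hrev, hcontra]
      rfl
    rw [List.dropWhile_cons_of_neg (by simpa using ha), ← hrev, List.reverse_reverse]

theorem collapse_toList (path : String) :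
    (collapse_duplicate_slashes path).toList = crec false path.toList := by
  unfold collapse_duplicate_slashes
  by_cases h : path = ""
  · simp [h, crec]
  · rw [if_neg h, foldl_collapseStep]
    simp [String.toList_ofList]

-- A's final assembly (with the dead rstrip) equals B's direct assembly for cleaned list C
-- whose elements are nonempty and slash-free
theorem assembly_abs (C : List (List Char)) (hCP : ∀ x ∈ C, x ≠ [] ∧ '/' ∉ x) :
    (if ('/' :: PySem.Chars.join ['/'] C) = [] then "/"
     else if ('/' :: PySem.Chars.join ['/'] C) ≠ ['/'] then
       String.ofList (rstripSlash ('/' :: PySem.Chars.join ['/'] C))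
     else String.ofList ('/' :: PySem.Chars.join ['/'] C))
    = String.ofList ('/' :: PySem.Chars.join ['/'] C) := by
  by_cases hCnil : C = []
  · subst hCnil; decide
  · have hjoin_ne : PySem.Chars.join ['/'] C ≠ [] :=
      join_ne_nil C hCnil (fun x hx => (hCP x hx).1)
    have hne2 : ('/' :: PySem.Chars.join ['/'] C) ≠ ['/'] := by
      intro hcontra
      exact hjoin_ne (by simpa using hcontra)
    have hrstrip : rstripSlash ('/' :: PySem.Chars.join ['/'] C) = '/' :: PySem.Chars.join ['/'] C := by
      apply rstripSlash_of_getLast?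
      rw [show ('/' :: PySem.Chars.join ['/'] C) = ['/'] ++ PySem.Chars.join ['/'] C from rfl,
        List.getLast?_append_of_ne_nil _ hjoin_ne]
      exact getLast?_join C hCnil hCP
    simp [hne2, hrstrip]

theorem assembly_rel (C : List (List Char)) (hCP : ∀ x ∈ C, x ≠ [] ∧ '/' ∉ x) :
    (if PySem.Chars.join ['/'] C = [] then "*"
     else if PySem.Chars.join ['/'] C ≠ ['/'] then
       String.ofList (rstripSlash (PySem.Chars.join ['/'] C))
     else String.ofList (PySem.Chars.join ['/'] C))
    = (if C ≠ [] then String.ofList (PySem.Chars.join ['/'] C) else "*") := by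
  by_cases hCnil : C = []
  · subst hCnil; decide
  · have hjoin_ne : PySem.Chars.join ['/'] C ≠ [] :=
      join_ne_nil C hCnil (fun x hx => (hCP x hx).1)
    have hlast : (PySem.Chars.join ['/'] C).getLast? ≠ some '/' := getLast?_join C hCnil hCP
    have hne2 : PySem.Chars.join ['/'] C ≠ ['/'] := by
      intro hcontra
      apply hlast
      rw [hcontra]
      rfl
    have hrstrip : rstripSlash (PySem.Chars.join ['/'] C) = PySem.Chars.join ['/'] C :=
      rstripSlash_of_getLast? _ hlast
    simp [hjoin_ne, hne2, hCnil, hrstrip]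

-- ===== VERDICT (by name: the statement is the Claim_ definition above) =====
set_option maxHeartbeats 1000000 in
theorem normalize_glob_pattern_spec : Claim_equal_normalize_glob_pattern := by
  intro pattern _
  unfold Spec_normalize_glob_pattern
  set base := PySem.Str.replace (PySem.Str.strip pattern) "\\" "/" with hbase
  set N := collapse_duplicate_slashes base with hN
  set abs := PySem.Chars.startswith N.toList ['/'] with habs
  set C := (PySem.Chars.splitOn N.toList ['/']).foldl (segStep abs) [] with hC
  set absB := PySem.Chars.startswith base.toList ['/'] with habsB
  set G := (PySem.Chars.splitOn base.toList ['/']).filter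
      (fun seg => decide (¬ (seg = [] ∨ seg = ['.']))) with hG
  set st := G.reverse.foldl revStep (0, ([] : List (List Char))) with hst
  have hA : normalize_glob_pattern pattern =
      (if N = "" then "*"
       else
        let result := if abs then '/' :: PySem.Chars.join ['/'] C else PySem.Chars.join ['/'] C
        if result = [] then (if abs then "/" else "*")
        else if result ≠ ['/'] then String.ofList (rstripSlash result)
        else String.ofList result) := rfl
  have hB : normalize_glob_pattern_alt pattern =
      (if base = "" then "*"
       else if absB then String.ofList ('/' :: PySem.Chars.join ['/'] st.2.reverse)
       else
        let kept' := List.replicate st.1 ['.', '.'] ++ st.2.reverse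
        if kept' ≠ [] then String.ofList (PySem.Chars.join ['/'] kept') else "*") := rfl
  rw [hA, hB]
  have hNlist : N.toList = crec false base.toList := collapse_toList base
  have habs_eq : abs = absB := by
    rw [habs, habsB, hNlist, startswith_crec_false]
  by_cases hb : base = ""
  · have hNnil : N = "" := by rw [hN, hb]; rfl
    rw [if_pos hNnil, if_pos hb]
  · have hbl : base.toList ≠ [] := fun hc => hb (String.toList_eq_nil_iff.mp hc)
    have hNne : N ≠ "" := by
      intro hc
      apply hbl
      apply (crec_false_eq_nil_iff base.toList).mp
      rw [← hNlist, hc]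
      rfl
    -- B's state in brec form
    have hstval : st = ((brec G).1, (brec G).2.reverse) := rev_foldl_eq_brec G
    -- elements of G are nonempty and slash-free
    have hGgood : ∀ x ∈ G, x ≠ [] ∧ '/' ∉ x := by
      intro x hx
      rw [hG, splitOn_singleton] at hx
      refine ⟨?_, splitc_no_sep '/' _ x (List.mem_of_mem_filter hx)⟩
      have hgood := List.of_mem_filter hx
      intro hcontra
      simp [hcontra] at hgood
    have hrgood : ∀ x ∈ (brec G).2, x ≠ [] ∧ '/' ∉ x :=
      fun x hx => hGgood x (brec_mem G x hx)
    -- A's cleaned list as a segPush fold over G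
    have hCrep : C = G.foldl (segPush abs) [] := by
      rw [hC, hNlist, splitOn_singleton]
      have := foldl_skip (fun (s : List Char) => s = [] ∨ s = ['.']) (segPush abs)
        (splitc '/' (crec false base.toList)) []
      rw [show (splitc '/' (crec false base.toList)).foldl (segStep abs) []
          = (splitc '/' (crec false base.toList)).foldl
              (fun acc x => if x = [] ∨ x = ['.'] then acc else segPush abs acc x) [] from rfl,
        this, filtered_crec, hG, splitOn_singleton]
    rw [if_neg hNne, if_neg hb, hstval]
    cases habsv : absB with
    | true =>
      have habsT : abs = true := by rw [habs_eq, habsv]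
      have hCval : C = (brec G).2 := by
        rw [hCrep, habsT, foldl_segPush_true G [] (by simp)]
        simp
      simp only [habsT, if_true, List.reverse_reverse, ← hCval]
      exact assembly_abs C (hCval ▸ hrgood)
    | false =>
      have habsF : abs = false := by rw [habs_eq, habsv]
      have hCval : C = List.replicate (brec G).1 ['.', '.'] ++ (brec G).2 := by
        rw [hCrep, habsF]
        have := foldl_segPush_false G 0 [] (by simp)
        simpa using this
      have hCgood : ∀ x ∈ C, x ≠ [] ∧ '/' ∉ x := by
        intro x hx
        rw [hCval] at hx
        rcases List.mem_append.mp hx with hm | hm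
        · have := List.eq_of_mem_replicate hm
          subst this
          exact ⟨by simp, by decide⟩
        · exact hrgood x hm
      simp only [habsF, if_false, Bool.false_eq_true, List.reverse_reverse, ← hCval]
      rw [← hCval] at *
      exact assembly_rel C hCgood
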